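-- pv_equiv track=rewrite | github.com/robbeykaaso/rea3 | py/reapython/reaRemote.py | parseJsons
-- ===== SOURCE A (Python) =====
-- def parseJsons(aContent: str) -> list:
--     ret = list()
--     tt = aContent.split("}{")
--     len_tt = len(tt)
--     for i in range(len_tt):
--         str = tt[i]
--         if i > 0:
--             str = "{" + str
--         if i < len_tt - 1:
--             str = str + "}"
--         ret.append(str)
--     return ret
-- ===== SOURCE B (Python) =====
-- def parseJsons(aContent: str) -> list:
--     ret = []
--     cur = ""
--     for ch in aContent:
--         if ch == '{' and cur.endswith('}'):
--             ret.append(cur)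
--             cur = ""
--         cur += ch
--     ret.append(cur)
--     return ret
-- ===== Notes on version B (the rewrite author's own statement) =====
-- stated objective: simpler
-- what changed: Replaces the separator-split plus an indexed rebuild loop that re-attaches the dropped braces with a single left-to-right scan that cuts the string directly at each close-brace/open-brace boundary, so no braces are ever removed and re-added.
import Mathlib
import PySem

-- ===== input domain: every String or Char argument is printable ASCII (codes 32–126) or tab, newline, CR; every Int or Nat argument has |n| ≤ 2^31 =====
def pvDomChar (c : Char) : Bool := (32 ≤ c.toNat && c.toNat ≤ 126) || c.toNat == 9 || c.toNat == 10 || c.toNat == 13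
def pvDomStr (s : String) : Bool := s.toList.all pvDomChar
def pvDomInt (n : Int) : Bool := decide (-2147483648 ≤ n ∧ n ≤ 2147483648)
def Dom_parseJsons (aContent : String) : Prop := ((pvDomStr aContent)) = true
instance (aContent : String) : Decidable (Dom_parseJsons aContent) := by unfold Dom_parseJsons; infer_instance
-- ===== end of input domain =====

-- B replaces A's separator-split-then-rebuild loop with a single scan that cuts at each
-- close-brace/open-brace boundary directly (objective: simpler); same return value either way.

-- ===== PORT A =====
def parseJsons (aContent : String) : List String :=
  let tt := PySem.Chars.splitOn aContent.toList "}{".toList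
  let len_tt : Int := tt.length
  (PySem.List.pyRange 0 len_tt 1).foldl (fun ret i =>
    let s := (PySem.List.pyGet? tt i).getD []
    let s := if i > 0 then '{' :: s else s
    let s := if i < len_tt - 1 then s ++ ['}'] else s
    ret ++ [String.ofList s]) []

-- ===== PORT B =====
def parseJsons_alt (aContent : String) : List String :=
  let p := aContent.toList.foldl (fun (st : List (List Char) × List Char) ch =>
    let st := if ch == '{' && PySem.Chars.endswith st.2 ['}']
              then (st.1 ++ [st.2], ([] : List Char)) else st
    (st.1, st.2 ++ [ch])) ([], [])
  (p.1 ++ [p.2]).map String.ofList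

-- ===== PRECONDITION & SPEC =====
def Spec_parseJsons (aContent : String) (out : List String) : Prop := out = parseJsons_alt aContent
instance (aContent : String) (out : List String) : Decidable (Spec_parseJsons aContent out) := by unfold Spec_parseJsons; infer_instance

-- ===== CLAIM (what is proved, stated in full; the proofs are below) =====
def Claim_equal_parseJsons : Prop := ∀ (aContent : String), Dom_parseJsons aContent → Spec_parseJsons aContent (parseJsons aContent)

-- ===== LEMMAS AND PROOFS =====

/-- Fuel-free version of `PySem.Chars.splitOn` for the separator `"}{"`, cur in natural order. -/
def mySplit : List Char → List Char → List (List Char)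
  | [], cur => [cur]
  | c :: rest, cur =>
    if c = '}' ∧ rest.head? = some '{' then cur :: mySplit rest.tail []
    else mySplit rest (cur ++ [c])
termination_by l _ => l.length
decreasing_by
  · cases rest <;> simp
  · simp

/-- B's scan, recursively. -/
def scanGo (cur : List Char) : List Char → List (List Char)
  | [] => [cur]
  | c :: rest =>
    if c == '{' && PySem.Chars.endswith cur ['}'] then cur :: scanGo [c] rest
    else scanGo (cur ++ [c]) rest

/-- A's rebuild of the split pieces, structurally. -/
def glue : List (List Char) → List (List Char)
  | [] => []
  | [x] => [x]
  | x :: y :: rest => (x ++ ['}']) :: glue (('{' :: y) :: rest)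
termination_by l => l.length

lemma mySplit_ne_nil (l cur : List Char) : mySplit l cur ≠ [] := by
  induction l, cur using mySplit.induct with
  | case1 cur => simp [mySplit]
  | case2 c rest cur hc ih => rw [mySplit, if_pos hc]; simp
  | case3 c rest cur hc ih => rw [mySplit, if_neg hc]; exact ih

lemma mySplit_pre (l : List Char) : ∀ (pre cur h : List Char) (t : List (List Char)),
    mySplit l cur = h :: t → mySplit l (pre ++ cur) = (pre ++ h) :: t := by
  induction l with
  | nil =>
    intro pre cur h t he
    simp [mySplit] at he ⊢
    simp [he.1, he.2]
  | cons c rest ih =>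
    intro pre cur h t he
    by_cases hc : c = '}' ∧ rest.head? = some '{'
    · rw [mySplit, if_pos hc] at he ⊢
      obtain ⟨rfl, rfl⟩ : cur = h ∧ mySplit rest.tail [] = t := by cases he; exact ⟨rfl, rfl⟩
      rfl
    · rw [mySplit, if_neg hc] at he ⊢
      have := ih pre (cur ++ [c]) h t he
      rwa [← List.append_assoc] at this

/-- `splitOn.go` with enough fuel computes `mySplit`. -/
lemma go_eq : ∀ (fuel : Nat) (l cur : List Char) (acc : List (List Char)),
    l.length < fuel →
    PySem.Chars.splitOn.go "}{".toList fuel l cur acc = acc.reverse ++ mySplit l cur.reverse := by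
  intro fuel
  induction fuel with
  | zero => intro l cur acc h; omega
  | succ f ih =>
    intro l cur acc h
    match l with
    | [] => simp [PySem.Chars.splitOn.go, mySplit]
    | c :: rest =>
      rw [PySem.Chars.splitOn.go]
      by_cases hp : c = '}' ∧ rest.head? = some '{'
      · obtain ⟨rfl, hh⟩ := hp
        rcases rest with _ | ⟨d, rest'⟩
        · simp at hh
        · have hd : d = '{' := by simpa using hh
          subst hd
          have hpre : List.isPrefixOf "}{".toList ('}' :: '{' :: rest') = true := by
            simp [List.isPrefixOf]
          rw [if_pos hpre]
          have h2 : List.drop ("}{".toList).length ('}' :: '{' :: rest') = rest' := by simp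
          rw [h2, ih rest' [] (cur.reverse :: acc) (by simp at h ⊢; omega)]
          rw [mySplit]
          simp
      · have hpre : List.isPrefixOf "}{".toList (c :: rest) = false := by
          rw [Bool.eq_false_iff]
          intro hx
          rw [List.isPrefixOf_iff_prefix] at hx
          obtain ⟨t, ht⟩ := hx
          have ht' : '}' :: '{' :: t = c :: rest := ht
          obtain ⟨hc, hr⟩ : c = '}' ∧ rest = '{' :: t := by
            cases ht'; exact ⟨rfl, rfl⟩
          exact hp ⟨hc, by simp [hr]⟩
        rw [if_neg (by rw [hpre]; exact Bool.false_ne_true)]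
        rw [ih rest (c :: cur) acc (by simp at h ⊢; omega)]
        rw [mySplit, if_neg hp]
        simp

lemma splitOn_eq (l : List Char) :
    PySem.Chars.splitOn l "}{".toList = mySplit l [] := by
  unfold PySem.Chars.splitOn
  rw [go_eq (l.length + 1) l [] [] (by omega)]
  simp

/-- Main correspondence: A's rebuild of `mySplit` equals B's scan. -/
lemma glue_mySplit : ∀ (n : Nat) (l cur : List Char), l.length ≤ n →
    ¬(cur.getLast? = some '}' ∧ l.head? = some '{') →
    glue (mySplit l cur) = scanGo cur l := by
  intro n
  induction n with
  | zero =>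
    intro l cur hl _
    match l, hl with
    | [], _ => simp [mySplit, scanGo, glue]
  | succ m ih =>
    intro l cur hl hinv
    match l with
    | [] => simp [mySplit, scanGo, glue]
    | c :: rest =>
      rw [mySplit]
      by_cases hp : c = '}' ∧ rest.head? = some '{'
      · obtain ⟨rfl, hh⟩ := hp
        rcases rest with _ | ⟨d, rest'⟩
        · simp at hh
        have hd : d = '{' := by simpa using hh
        subst hd
        ·
          rw [if_pos ⟨rfl, rfl⟩]
          simp only [List.tail_cons]
          obtain ⟨h, t, hht⟩ : ∃ h t, mySplit rest' [] = h :: t := by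
            rcases he : mySplit rest' [] with _ | ⟨h, t⟩
            · exact absurd he (mySplit_ne_nil _ _)
            · exact ⟨h, t, rfl⟩
          have hpre := mySplit_pre rest' ['{'] [] h t hht
          simp at hpre
          rw [hht, glue, ← hpre,
            ih rest' ['{'] (by simp at hl ⊢; omega) (by simp)]
          -- now the scan side
          have h1 : (('}' : Char) == '{' && PySem.Chars.endswith cur ['}']) = false := by simp
          have h2 : (('{' : Char) == '{' && PySem.Chars.endswith (cur ++ ['}']) ['}']) = true := by
            simp [PySem.Chars.endswith_iff]
          rw [scanGo, if_neg (by rw [h1]; exact Bool.false_ne_true), scanGo, if_pos h2]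
      · rw [if_neg hp]
        have hinv' : ¬((cur ++ [c]).getLast? = some '}' ∧ rest.head? = some '{') := by
          rintro ⟨h1, h2⟩
          exact hp ⟨by simpa using h1, h2⟩
        rw [ih rest (cur ++ [c]) (by simp at hl ⊢; omega) hinv']
        rw [scanGo, if_neg ?_]
        rw [Bool.not_eq_true, Bool.and_eq_false_iff]
        by_cases hc : c = '{'
        · subst hc
          right
          rw [Bool.eq_false_iff]
          intro hend
          rw [PySem.Chars.endswith_iff] at hend
          obtain ⟨ys, hys⟩ := hend
          exact hinv ⟨by simp [← hys], by simp⟩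
        · left; simpa using hc

/-- The step function of B's fold (proof-side name; definitionally the lambda in `parseJsons_alt`). -/
def stepB (st : List (List Char) × List Char) (ch : Char) : List (List Char) × List Char :=
  let st := if ch == '{' && PySem.Chars.endswith st.2 ['}']
            then (st.1 ++ [st.2], ([] : List Char)) else st
  (st.1, st.2 ++ [ch])

/-- B's fold, flushed, equals the recursive scan. -/
lemma fold_scan : ∀ (l : List Char) (ret : List (List Char)) (cur : List Char),
    (l.foldl stepB (ret, cur)).1 ++ [(l.foldl stepB (ret, cur)).2] = ret ++ scanGo cur l := by
  intro l
  induction l with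
  | nil => intro ret cur; simp [scanGo]
  | cons c rest ih =>
    intro ret cur
    rw [List.foldl_cons, scanGo]
    by_cases hc : (c == '{' && PySem.Chars.endswith cur ['}']) = true
    · have h1 : stepB (ret, cur) c = (ret ++ [cur], [] ++ [c]) := by
        simp only [stepB, hc, if_pos]
      rw [h1, if_pos hc, ih (ret ++ [cur]) ([] ++ [c])]
      simp
    · have h1 : stepB (ret, cur) c = (ret, cur ++ [c]) := by
        simp only [stepB]
        rw [if_neg hc]
      rw [h1, if_neg hc, ih ret (cur ++ [c])]

/-- The tail-map form of `glue`. -/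
lemma glue_cons_map : ∀ (tail : List (List Char)) (x : List Char),
    glue (x :: tail)
      = (x ++ if tail.isEmpty then [] else ['}'])
        :: (List.range tail.length).map
             (fun j => ('{' :: tail.getD j []) ++ if j < tail.length - 1 then ['}'] else []) := by
  intro tail
  induction tail with
  | nil => intro x; simp [glue]
  | cons y rest ih =>
    intro x
    rw [glue, ih ('{' :: y)]
    simp only [List.length_cons, List.range_succ_eq_map, List.map_cons, List.map_map]
    congr 1
    congr 1
    · rcases rest with _ | _ <;> simp
    · apply List.map_congr_left
      intro j _
      simp only [Function.comp_apply, List.getD_cons_succ]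
      congr 1
      by_cases hj : j < rest.length - 1
      · rw [if_pos hj, if_pos (by omega)]
      · rw [if_neg hj, if_neg (by rcases rest with _ | _ <;> simp_all)]

lemma foldl_map_append {α β : Type} (f : α → β) : ∀ (l : List α) (acc : List β),
    l.foldl (fun r x => r ++ [f x]) acc = acc ++ l.map f := by
  intro l
  induction l with
  | nil => intro acc; simp
  | cons x rest ih => intro acc; simp [ih]

/-- A's indexed loop over pyRange, evaluated. -/
lemma loopA_eq (tt : List (List Char)) (htt : tt ≠ []) :
    (PySem.List.pyRange 0 (tt.length : Int) 1).foldl (fun ret i =>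
      let s := (PySem.List.pyGet? tt i).getD []
      let s := if i > 0 then '{' :: s else s
      let s := if i < (tt.length : Int) - 1 then s ++ ['}'] else s
      ret ++ [String.ofList s]) []
    = (glue tt).map String.ofList := by
  rcases tt with _ | ⟨x, tail⟩
  · simp at htt
  have hrange : PySem.List.pyRange 0 ((x :: tail).length : Int) 1
      = (List.range (x :: tail).length).map Int.ofNat := by
    unfold PySem.List.pyRange
    rw [if_neg one_ne_zero, if_pos one_pos,
      if_pos (by exact_mod_cast Nat.succ_pos tail.length)]
    simp only [sub_zero, add_sub_cancel_right, Int.ediv_one, Int.toNat_natCast]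
    apply List.map_congr_left
    intro k _
    simp [Int.ofNat_eq_natCast]
  rw [hrange, List.foldl_map, foldl_map_append]
  simp only [List.nil_append]
  rw [glue_cons_map]
  rw [List.length_cons, List.range_succ_eq_map, List.map_cons, List.map_map, List.map_cons]
  congr 1
  · simp only [Int.ofNat_eq_natCast]
    have h0 : ¬((0 : Int) > 0) := by omega
    rw [show PySem.List.pyGet? (x :: tail) ((0 : Nat) : Int) = some x from by
        rw [PySem.List.pyGet?_natCast]; simp]
    simp only [Int.natCast_zero, Option.getD_some, if_neg h0]
    by_cases he : tail.isEmpty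
    · have h2 : tail = [] := List.isEmpty_iff.mp he
      subst h2
      norm_num
    · have hlen : 0 < tail.length := by
        rcases tail with _ | _
        · simp at he
        · simp
      rw [if_pos (by push_cast; omega), if_neg he]
  · rw [List.map_map]
    apply List.map_congr_left
    intro j hj
    simp only [List.mem_range] at hj
    simp only [Function.comp_apply, Int.ofNat_eq_natCast]
    rw [show ((Nat.succ j : Nat) : Int) = ((j + 1 : Nat) : Int) from rfl,
      PySem.List.pyGet?_natCast]
    have hget : (x :: tail)[j + 1]? = some (tail.getD j []) := by
      simp only [List.getElem?_cons_succ, List.getD_eq_getElem?_getD]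
      rw [List.getElem?_eq_getElem hj]
      simp
    rw [hget]
    simp only [Option.getD_some]
    rw [if_pos (show ((j + 1 : Nat) : Int) > 0 by exact_mod_cast Nat.succ_pos j)]
    have hcond : (((j + 1 : Nat) : Int) < ((tail.length + 1 : Nat) : Int) - 1)
        ↔ j < tail.length - 1 := by
      push_cast
      omega
    by_cases hlt : j < tail.length - 1
    · rw [if_pos (hcond.mpr hlt), if_pos hlt]
    · rw [if_neg (fun h => hlt (hcond.mp h)), if_neg hlt]
      simp

-- ===== VERDICT (by name: the statement is the Claim_ definition above) =====
theorem parseJsons_spec : Claim_equal_parseJsons := by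
  intro aContent _
  unfold Spec_parseJsons
  have hA : parseJsons aContent
      = (glue (PySem.Chars.splitOn aContent.toList "}{".toList)).map String.ofList :=
    loopA_eq _ (by rw [splitOn_eq]; exact mySplit_ne_nil _ _)
  have hB : parseJsons_alt aContent
      = ((aContent.toList.foldl stepB ([], [])).1
          ++ [(aContent.toList.foldl stepB ([], [])).2]).map String.ofList := rfl
  rw [hA, hB, fold_scan, splitOn_eq,
    glue_mySplit aContent.toList.length aContent.toList [] le_rfl (by simp)]
  simp
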